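-- pv_equiv track=rewrite | github.com/loh-0/Lohith-Coding-Projects | connectk.py | neg_diagonal_check_k
-- ===== SOURCE A (Python) =====
-- def neg_diagonal_check_k(board, player, k):
-- 	'''
-- 	Inputs: (board, player, k)
-- 	returns a count for how many negative diagonal ks there are on the board
--
-- 	'''
-- 	consectokens = 0
-- 	count= 0
--
-- 	#iterating through the board
-- 	for column in range(len(board[0]) - (k - 1)):
-- 		for row in range(len(board) - (k - 1)):
-- 			#checking consecutive pieces for the player
-- 			if board[row][column] == player:
-- 				consectokens = 0
-- 				for kadd in range(k):
-- 					if board[row][column] == board[row + kadd][column + kadd]: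
-- 						consectokens += 1
-- 						if consectokens == k:
-- 							count += 1
-- 	return count
-- ===== SOURCE B (Python) =====
-- def neg_diagonal_check_k(board, player, k):
--     # Run-length DP: run = length of the consecutive player-streak ending at the
--     # current cell along its down-right diagonal; each cell whose streak reaches k
--     # is the END of exactly one length-k diagonal, so counting them counts starts.
--     cols = len(board[0])
--     count = 0
--     prev = [0] * cols
--     for row in board:
--         cur = []
--         for c in range(cols):
--             run = 1 + (prev[c - 1] if c > 0 else 0) if row[c] == player else 0
--             cur.append(run)
--             if run >= k:
--                 count += 1
--         prev = cur
--     return count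
-- ===== Notes on version B (the rewrite author's own statement) =====
-- stated objective: alternative
-- what changed: A re-scans k diagonal cells from every start position with a consecutive-token counter; B makes one sweep over the board keeping a per-column run-length DP (length of the player-streak ending at each cell along its down-right diagonal) and counts cells whose streak reaches k.
-- outside the precondition, e.g. on neg_diagonal_check_k([[1, 1, 1], [1, 1]], 0, 3): A returns 0, B raises IndexError
import Mathlib
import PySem

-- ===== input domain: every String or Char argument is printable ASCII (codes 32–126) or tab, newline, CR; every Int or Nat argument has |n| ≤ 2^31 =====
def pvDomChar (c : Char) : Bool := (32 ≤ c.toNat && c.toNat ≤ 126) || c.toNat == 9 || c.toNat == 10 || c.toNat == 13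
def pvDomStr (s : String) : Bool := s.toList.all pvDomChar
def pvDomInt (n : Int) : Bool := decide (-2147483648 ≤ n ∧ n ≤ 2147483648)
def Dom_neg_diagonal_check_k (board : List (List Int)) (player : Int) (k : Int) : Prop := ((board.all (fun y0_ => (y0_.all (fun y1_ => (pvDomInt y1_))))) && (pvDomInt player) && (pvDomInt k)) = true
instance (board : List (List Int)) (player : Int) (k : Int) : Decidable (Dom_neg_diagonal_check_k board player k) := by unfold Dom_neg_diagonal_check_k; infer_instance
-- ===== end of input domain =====

-- B replaces A's per-start diagonal rescans by a single run-length-DP sweep that counts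
-- the end cells of length-k player diagonals (alternative algorithm; equal values on Pre_).


-- ===== PORT A =====
-- board[row][column] in total form: exact under Pre_ (all indices are then in range;
-- where Python would raise IndexError the input is excluded by Pre_).
def pvIdx2 (board : List (List Int)) (r c : Int) : Int :=
  PySem.List.pyGetD (PySem.List.pyGetD board r []) c 0

def neg_diagonal_check_k (board : List (List Int)) (player : Int) (k : Int) : Int :=
  -- len(board[0]) raises IndexError on board = [] (excluded by Pre_)
  let cols : Int := PySem.List.len (PySem.List.pyGetD board 0 [])
  let rows : Int := PySem.List.len board
  -- state = (consectokens, count)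
  ((PySem.List.pyRange 0 (cols - (k - 1)) 1).foldl (fun st column =>
    (PySem.List.pyRange 0 (rows - (k - 1)) 1).foldl (fun st row =>
      if pvIdx2 board row column == player then
        (PySem.List.pyRange 0 k 1).foldl (fun st kadd =>
          if pvIdx2 board row column == pvIdx2 board (row + kadd) (column + kadd) then
            (st.1 + 1, if st.1 + 1 == k then st.2 + 1 else st.2)
          else st) ((0 : Int), st.2)
      else st) st) (((0 : Int), (0 : Int)))).2

-- ===== PORT B =====
def neg_diagonal_check_k_alt (board : List (List Int)) (player : Int) (k : Int) : Int :=
  let cols : Int := PySem.List.len (PySem.List.pyGetD board 0 [])  -- len(board[0])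
  -- outer state = (prev, count); inner state = (cur, count)
  (board.foldl (fun (pc : List Int × Int) row =>
      (PySem.List.pyRange 0 cols 1).foldl (fun (s : List Int × Int) c =>
        let run : Int :=
          if PySem.List.pyGetD row c 0 == player then
            1 + (if c > 0 then PySem.List.pyGetD pc.1 (c - 1) 0 else 0)
          else 0
        (s.1 ++ [run], if run ≥ k then s.2 + 1 else s.2)) ([], pc.2))
    (PySem.List.pyRepeat [(0 : Int)] cols, (0 : Int))).2

-- ===== PRECONDITION & SPEC =====
-- A raises IndexError on the empty board and whenever k ≤ 0. Boards with a row shorter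
-- than len(board[0]) are excluded wholesale: A may raise on them and, on the few where A
-- happens to return, B raises (B indexes every row up to len(board[0])) — see claim cites.
def Pre_neg_diagonal_check_k (board : List (List Int)) (player : Int) (k : Int) : Prop :=
  board ≠ [] ∧ 1 ≤ k ∧ ∀ row ∈ board, (board.headD []).length ≤ row.length
instance (board : List (List Int)) (player : Int) (k : Int) : Decidable (Pre_neg_diagonal_check_k board player k) := by unfold Pre_neg_diagonal_check_k; infer_instance

def pvWitness_neg_diagonal_check_k : List (List Int) × Int × Int := ([[1, 1], [0, 1]], 1, 2)

def Spec_neg_diagonal_check_k (board : List (List Int)) (player : Int) (k : Int) (out : Int) : Prop := out = neg_diagonal_check_k_alt board player k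
instance (board : List (List Int)) (player : Int) (k : Int) (out : Int) : Decidable (Spec_neg_diagonal_check_k board player k out) := by unfold Spec_neg_diagonal_check_k; infer_instance

-- ===== CLAIM (what is proved, stated in full; the proofs are below) =====
def Claim_equal_neg_diagonal_check_k : Prop := ∀ (board : List (List Int)) (player : Int) (k : Int), Dom_neg_diagonal_check_k board player k → Pre_neg_diagonal_check_k board player k → Spec_neg_diagonal_check_k board player k (neg_diagonal_check_k board player k)

-- ===== LEMMAS AND PROOFS =====
-- Proof plan: both programs count the same set. A's count is shown to be the number of
-- start cells (r,c) with r < rows-k+1, c < cols-k+1 whose k down-right cells all equal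
-- player (pv_A_sum, via pv_inner: the consectokens counter reaches k exactly once iff
-- all k comparisons match). B's count is shown to be the number of cells whose
-- run-length pvRunN reaches k (pv_B_sum, via the row invariant pv_boardfold/pv_rowfold),
-- i.e. the number of END cells of length-k player diagonals (pv_run_iff). The map
-- (start ↦ start + (k-1, k-1)) is a bijection between the two sets (pv_sums_eq).

def pvCellN (board : List (List Int)) (r c : ℕ) : Int := (board.getD r []).getD c 0

def pvRunN (board : List (List Int)) (player : Int) : ℕ → ℕ → ℕ
  | 0, c => if pvCellN board 0 c = player then 1 else 0
  | r+1, 0 => if pvCellN board (r+1) 0 = player then 1 else 0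
  | r+1, c+1 => if pvCellN board (r+1) (c+1) = player then pvRunN board player r c + 1 else 0

def pvPrevVal (board : List (List Int)) (player : Int) (r c : ℕ) : Int :=
  match r with
  | 0 => 0
  | r' + 1 => (pvRunN board player r' c : Int)

def pvPrev (board : List (List Int)) (player : Int) (r : ℕ) : List Int :=
  (List.range (board.headD []).length).map (pvPrevVal board player r)

def pvRowSum (board : List (List Int)) (player k : Int) (r : ℕ) : Int :=
  ((List.range (board.headD []).length).map
    (fun c => if (pvRunN board player r c : Int) ≥ k then (1 : Int) else 0)).sum

def pvBStep (board : List (List Int)) (player k : Int) :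
    (List Int × Int) → List Int → (List Int × Int) := fun pc row =>
  (PySem.List.pyRange 0 (((board.headD []).length : ℕ) : Int) 1).foldl (fun (s : List Int × Int) c =>
    (s.1 ++ [if PySem.List.pyGetD row c 0 == player then
               1 + (if c > 0 then PySem.List.pyGetD pc.1 (c - 1) 0 else 0) else 0],
     if (if PySem.List.pyGetD row c 0 == player then
           1 + (if c > 0 then PySem.List.pyGetD pc.1 (c - 1) 0 else 0) else 0) ≥ k
     then s.2 + 1 else s.2)) ([], pc.2)

theorem pv_inner_aux {ι : Type} (kI : Int) (p : ι → Bool) (l : List ι) (ct0 : ℕ) (cnt : Int) :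
    l.foldl (fun st i => if p i then (st.1 + 1, if st.1 + 1 == kI then st.2 + 1 else st.2) else st)
      (((ct0 : ℕ) : Int), cnt)
    = (((ct0 + l.countP p : ℕ) : Int),
       cnt + (if kI ≤ ((ct0 + l.countP p : ℕ) : Int) then 1 else 0) - (if kI ≤ ((ct0 : ℕ) : Int) then 1 else 0)) := by
  induction l generalizing ct0 cnt with
  | nil => simp
  | cons x t ih =>
    by_cases hp : p x
    · simp only [List.foldl_cons, hp, if_pos]
      have h1 : ((ct0 : ℕ) : Int) + 1 = (((ct0 + 1 : ℕ) : ℕ) : Int) := by push_cast; ring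
      rw [h1]
      have h2 : (if (((ct0 + 1 : ℕ) : ℕ) : Int) == kI then cnt + 1 else cnt)
          = cnt + (if kI = ((ct0 + 1 : ℕ) : Int) then 1 else 0) := by
        simp only [beq_iff_eq]; split_ifs <;> omega
      rw [h2, ih]
      simp only [List.countP_cons, hp, if_pos, Prod.mk.injEq]
      constructor
      · push_cast; ring
      · split_ifs <;> omega
    · simp only [List.foldl_cons, hp, Bool.false_eq_true, if_neg, not_false_iff]
      rw [ih]
      simp [hp]

theorem pv_inner {ι : Type} (kI : Int) (hk : 1 ≤ kI) (p : ι → Bool) (l : List ι) (cnt : Int) :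
    (l.foldl (fun st i => if p i then (st.1 + 1, if st.1 + 1 == kI then st.2 + 1 else st.2) else st)
      ((0 : Int), cnt)).2
    = cnt + (if kI ≤ (l.countP p : Int) then 1 else 0) := by
  have := pv_inner_aux kI p l 0 cnt
  simp only [Nat.cast_zero, zero_add] at this
  rw [this]
  split_ifs <;> omega

theorem pv_foldl_snd {ι : Type} (l : List ι) (f : Int × Int → ι → Int × Int) (g : ι → Int)
    (h : ∀ st i, (f st i).2 = st.2 + g i) : ∀ st : Int × Int, (l.foldl f st).2 = st.2 + (l.map g).sum := by
  induction l with
  | nil => simp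
  | cons x t ih =>
    intro st
    simp only [List.foldl_cons, List.map_cons, List.sum_cons]
    rw [ih, h]
    ring

-- run-length characterisation: the streak ending at (r,c) reaches kk iff the kk cells up-left of it are all player

theorem pv_run_iff (board : List (List Int)) (player : Int) (kk : ℕ) :
    ∀ r c : ℕ, kk ≤ pvRunN board player r c ↔
      (kk ≤ r + 1 ∧ kk ≤ c + 1 ∧ ∀ i < kk, pvCellN board (r - i) (c - i) = player) := by
  induction kk with
  | zero => intro r c; simp
  | succ kk ih =>
    intro r c
    match r, c with
    | 0, c =>
      simp only [pvRunN]
      constructor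
      · intro h
        split_ifs at h with hcell
        · have hkk : kk = 0 := by omega
          subst hkk
          refine ⟨by omega, by omega, ?_⟩
          intro i hi
          interval_cases i
          simpa using hcell
        · omega
      · rintro ⟨h1, _, hw⟩
        have hkk : kk = 0 := by omega
        subst hkk
        have := hw 0 (by omega)
        simp at this
        simp [this]
    | r+1, 0 =>
      simp only [pvRunN]
      constructor
      · intro h
        split_ifs at h with hcell
        · have hkk : kk = 0 := by omega
          subst hkk
          refine ⟨by omega, by omega, ?_⟩
          intro i hi
          interval_cases i
          simpa using hcell
        · omega
      · rintro ⟨_, h2, hw⟩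
        have hkk : kk = 0 := by omega
        subst hkk
        have := hw 0 (by omega)
        simp at this
        simp [this]
    | r+1, c+1 =>
      simp only [pvRunN]
      constructor
      · intro h
        split_ifs at h with hcell
        · have hkk : kk ≤ pvRunN board player r c := by omega
          obtain ⟨h1, h2, hw⟩ := (ih r c).mp hkk
          refine ⟨by omega, by omega, ?_⟩
          intro i hi
          cases i with
          | zero => simpa using hcell
          | succ j =>
            have := hw j (by omega)
            have e1 : r + 1 - (j+1) = r - j := by omega
            have e2 : c + 1 - (j+1) = c - j := by omega
            rw [e1, e2]
            exact this
        · omega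
      · rintro ⟨h1, h2, hw⟩
        have hcell : pvCellN board (r+1) (c+1) = player := by
          have := hw 0 (by omega)
          simpa using this
        rw [if_pos hcell]
        have : kk ≤ pvRunN board player r c := by
          refine (ih r c).mpr ⟨by omega, by omega, ?_⟩
          intro j hj
          have := hw (j+1) (by omega)
          have e1 : r + 1 - (j+1) = r - j := by omega
          have e2 : c + 1 - (j+1) = c - j := by omega
          rw [e1, e2] at this
          exact this
        omega

theorem pv_idx_cast (board : List (List Int)) (r c : ℕ) :
    pvIdx2 board (r : Int) (c : Int) = pvCellN board r c := by
  simp [pvIdx2, pvCellN]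

theorem pv_idx_cast2 (board : List (List Int)) (r c j : ℕ) :
    pvIdx2 board ((r : Int) + (j : Int)) ((c : Int) + (j : Int)) = pvCellN board (r + j) (c + j) := by
  rw [← Nat.cast_add, ← Nat.cast_add, pv_idx_cast]

theorem pv_contrib (board : List (List Int)) (player k : Int) (hk : 1 ≤ k) (r c : ℕ) :
    (if pvCellN board r c == player then
      (if k ≤ ((List.range k.toNat).countP (fun j => pvCellN board r c == pvCellN board (r + j) (c + j)) : Int)
       then (1 : Int) else 0)
     else 0)
    = (if (List.range k.toNat).all (fun i => pvCellN board (r + i) (c + i) == player) then 1 else 0) := by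
  have hkn : ((k.toNat : ℕ) : Int) = k := Int.toNat_of_nonneg (by omega)
  by_cases hcell : pvCellN board r c = player
  · simp only [hcell, beq_self_eq_true, if_pos]
    have hle : (List.range k.toNat).countP (fun j => player == pvCellN board (r + j) (c + j)) ≤ k.toNat := by
      simpa using List.countP_le_length (l := List.range k.toNat)
        (p := fun j => player == pvCellN board (r + j) (c + j))
    by_cases hall : ∀ i ∈ List.range k.toNat, pvCellN board (r + i) (c + i) = player
    · have hcnt : (List.range k.toNat).countP (fun j => player == pvCellN board (r + j) (c + j)) = k.toNat := by
        have := (List.countP_eq_length (l := List.range k.toNat)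
          (p := fun j => player == pvCellN board (r + j) (c + j))).mpr ?_
        · simpa using this
        · intro a ha
          simp [hall a ha]
      rw [hcnt]
      have : (List.range k.toNat).all (fun i => pvCellN board (r + i) (c + i) == player) = true := by
        simp only [List.all_eq_true, beq_iff_eq]
        exact hall
      simp [this, hkn]
    · have hcnt : (List.range k.toNat).countP (fun j => player == pvCellN board (r + j) (c + j)) < k.toNat := by
        rcases Nat.lt_or_ge ((List.range k.toNat).countP (fun j => player == pvCellN board (r + j) (c + j))) k.toNat with h | h
        · exact h
        · exfalso
          apply hall
          intro a ha
          have hlen : List.countP (fun j => player == pvCellN board (r + j) (c + j)) (List.range k.toNat)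
              = (List.range k.toNat).length := by simpa using le_antisymm hle h
          have := (List.countP_eq_length).mp hlen a ha
          simp only [beq_iff_eq] at this
          exact this.symm
      have h1 : ¬ (k ≤ ((List.range k.toNat).countP (fun j => player == pvCellN board (r + j) (c + j)) : Int)) := by
        omega
      have h2 : ¬ ((List.range k.toNat).all (fun i => pvCellN board (r + i) (c + i) == player) = true) := by
        simp only [List.all_eq_true, beq_iff_eq]
        exact hall
      simp [h1, h2]
  · have h2 : ¬ ((List.range k.toNat).all (fun i => pvCellN board (r + i) (c + i) == player) = true) := by
      simp only [List.all_eq_true, beq_iff_eq]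
      intro h
      exact hcell (by simpa using h 0 (by simp; omega))
    have h3 : (pvCellN board r c == player) = false := by simp [hcell]
    simp [h2, h3]

theorem pv_A_sum (board : List (List Int)) (player k : Int) (hk : 1 ≤ k) :
    neg_diagonal_check_k board player k
    = ∑ c ∈ Finset.range ((((board.headD []).length : Int)) - (k - 1)).toNat,
        ∑ r ∈ Finset.range (((board.length : Int)) - (k - 1)).toNat,
          (if (List.range k.toNat).all (fun i => pvCellN board (r + i) (c + i) == player) then (1 : Int) else 0) := by
  have hhead : PySem.List.pyGetD board 0 ([] : List Int) = board.headD [] := by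
    cases board <;> simp [PySem.List.pyGetD_zero]
  simp only [neg_diagonal_check_k, PySem.List.len_eq, hhead]
  rw [pv_foldl_snd _ _ (fun column : Int =>
      ((PySem.List.pyRange 0 ((board.length : Int) - (k - 1)) 1).map (fun row : Int =>
        if pvIdx2 board row column == player then
          (if k ≤ (((PySem.List.pyRange 0 k 1).countP
              (fun kadd => pvIdx2 board row column == pvIdx2 board (row + kadd) (column + kadd))) : Int)
           then (1 : Int) else 0)
        else 0)).sum)
    (by
      intro st column
      refine pv_foldl_snd _ _ _ ?_ st
      intro st' row
      by_cases hg : (pvIdx2 board row column == player) = true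
      · simp only [hg, if_pos]
        exact pv_inner k hk _ _ _
      · simp [hg])]
  simp only [PySem.List.pyRange_one, Int.sub_zero, zero_add, List.map_map, List.countP_map,
    Function.comp_def]
  simp only [pv_idx_cast, pv_idx_cast2]
  simp only [pv_contrib board player k hk]
  rfl

theorem pv_runstep (board : List (List Int)) (player : Int) (r c : ℕ)
    (hc : c < (board.headD []).length) :
    (if PySem.List.pyGetD (board.getD r []) (c : Int) 0 == player then
       (1 : Int) + (if (c : Int) > 0 then PySem.List.pyGetD (pvPrev board player r) ((c : Int) - 1) 0 else 0)
     else 0) = (pvRunN board player r c : Int) := by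
  have hget : PySem.List.pyGetD (board.getD r []) (c : Int) 0 = pvCellN board r c := by
    simp [pvCellN]
  rw [hget]
  match r, c with
  | 0, 0 =>
    simp only [pvRunN]
    split_ifs with h1 h2 <;> simp_all [beq_iff_eq]
  | 0, c'+1 =>
    have hpos : ((c' + 1 : ℕ) : Int) > 0 := by push_cast; omega
    have hsub : ((c' + 1 : ℕ) : Int) - 1 = ((c' : ℕ) : Int) := by push_cast; ring
    have hprev : PySem.List.pyGetD (pvPrev board player 0) ((c' : ℕ) : Int) 0 = 0 := by
      have hlt : c' < (board.headD []).length := Nat.lt_of_succ_lt hc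
      simp only [pvPrev, PySem.List.pyGetD_natCast, List.getD, List.getElem?_map]
      rw [List.getElem?_range hlt]
      simp [pvPrevVal]
    rw [hsub, if_pos hpos, hprev]
    simp only [pvRunN]
    split_ifs with h1 h2 <;> simp_all [beq_iff_eq]
  | r'+1, 0 =>
    have hpos : ¬ ((0 : ℕ) : Int) > 0 := by simp
    rw [if_neg hpos]
    simp only [pvRunN]
    split_ifs with h1 h2 <;> simp_all [beq_iff_eq]
  | r'+1, c'+1 =>
    have hpos : ((c' + 1 : ℕ) : Int) > 0 := by push_cast; omega
    have hsub : ((c' + 1 : ℕ) : Int) - 1 = ((c' : ℕ) : Int) := by push_cast; ring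
    have hprev : PySem.List.pyGetD (pvPrev board player (r'+1)) ((c' : ℕ) : Int) 0
        = (pvRunN board player r' c' : Int) := by
      have hlt : c' < (board.headD []).length := Nat.lt_of_succ_lt hc
      simp only [pvPrev, PySem.List.pyGetD_natCast, List.getD, List.getElem?_map]
      rw [List.getElem?_range hlt]
      simp [pvPrevVal]
    rw [hsub, if_pos hpos, hprev]
    simp only [pvRunN]
    split_ifs with h1 h2 <;> simp_all [beq_iff_eq] <;> push_cast <;> omega

theorem pv_rowfold (board : List (List Int)) (player k : Int) (r : ℕ) (v : ℕ → Int)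
    (n : ℕ) (hv : ∀ c : ℕ, c < n → v c = (pvRunN board player r c : Int)) :
    ∀ (acc : List Int) (cnt : Int),
    (List.range n).foldl
      (fun (s : List Int × Int) c => (s.1 ++ [v c], if v c ≥ k then s.2 + 1 else s.2)) (acc, cnt)
    = (acc ++ (List.range n).map (fun c => (pvRunN board player r c : Int)),
       cnt + ((List.range n).map
         (fun c => if (pvRunN board player r c : Int) ≥ k then (1 : Int) else 0)).sum) := by
  induction n with
  | zero => intro acc cnt; simp
  | succ n ih =>
    intro acc cnt
    rw [List.range_succ, List.foldl_append]
    rw [ih (fun c hc => hv c (by omega))]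
    simp only [List.foldl_cons, List.foldl_nil]
    rw [hv n (by omega)]
    simp only [List.map_append, List.map_cons, List.map_nil, List.sum_append, List.sum_cons,
      List.sum_nil, List.append_assoc]
    rw [Prod.mk.injEq]
    exact ⟨rfl, by split_ifs <;> ring⟩

theorem pv_boardfold (board : List (List Int)) (player k : Int) :
    ∀ (rs : List (List Int)) (r0 : ℕ), board.drop r0 = rs → ∀ cnt : Int,
    rs.foldl (pvBStep board player k) (pvPrev board player r0, cnt)
    = (pvPrev board player (r0 + rs.length),
       cnt + ((List.range rs.length).map (fun t => pvRowSum board player k (r0 + t))).sum) := by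
  intro rs
  induction rs with
  | nil => intro r0 _ cnt; simp
  | cons row rs' ih =>
    intro r0 hdrop cnt
    have hrow : board.getD r0 [] = row := by
      have h0 : (board.drop r0)[0]? = some row := by rw [hdrop]; rfl
      rw [List.getElem?_drop] at h0
      simp only [Nat.add_zero] at h0
      simp [List.getD_eq_getElem?_getD, h0]
    have hdrop' : board.drop (r0 + 1) = rs' := by
      have := congrArg (List.drop 1) hdrop
      rw [List.drop_drop] at this
      simpa using this
    have hstep : pvBStep board player k (pvPrev board player r0, cnt) row
        = (pvPrev board player (r0 + 1), cnt + pvRowSum board player k r0) := by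
      unfold pvBStep
      rw [PySem.List.pyRange_one]
      simp only [Int.sub_zero, Int.toNat_natCast, zero_add]
      rw [List.foldl_map]
      rw [pv_rowfold board player k r0
        (fun c : ℕ => if PySem.List.pyGetD row (c : Int) 0 == player then
            1 + (if (c : Int) > 0 then PySem.List.pyGetD (pvPrev board player r0) ((c : Int) - 1) 0 else 0)
          else 0)
        (board.headD []).length
        (fun c hc => by rw [← hrow]; exact pv_runstep board player r0 c hc) [] cnt]
      have hcur : (List.range (board.headD []).length).map (fun c => (pvRunN board player r0 c : Int))
          = pvPrev board player (r0 + 1) := by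
        simp [pvPrev, pvPrevVal]
      rw [List.nil_append, hcur]
      rfl
    rw [List.foldl_cons, hstep, ih (r0 + 1) hdrop']
    rw [Prod.mk.injEq]
    simp only [List.length_cons]
    constructor
    · rw [show r0 + 1 + rs'.length = r0 + (rs'.length + 1) from by omega]
    · rw [List.range_succ_eq_map, List.map_cons, List.map_map, List.sum_cons]
      have : (List.range rs'.length).map ((fun t => pvRowSum board player k (r0 + t)) ∘ Nat.succ)
          = (List.range rs'.length).map (fun t => pvRowSum board player k (r0 + 1 + t)) := by
        apply List.map_congr_left
        intro t _
        simp only [Function.comp_apply]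
        rw [show r0 + Nat.succ t = r0 + 1 + t from by omega]
      rw [this]
      simp only [Nat.add_zero]
      ring

theorem pv_B_sum (board : List (List Int)) (player k : Int) :
    neg_diagonal_check_k_alt board player k
    = ∑ r ∈ Finset.range board.length, ∑ c ∈ Finset.range (board.headD []).length,
        (if (pvRunN board player r c : Int) ≥ k then (1 : Int) else 0) := by
  have hhead : PySem.List.pyGetD board 0 ([] : List Int) = board.headD [] := by
    cases board <;> simp [PySem.List.pyGetD_zero]
  simp only [neg_diagonal_check_k_alt, PySem.List.len_eq, hhead]
  have hinit : PySem.List.pyRepeat [(0 : Int)] (((board.headD []).length : ℕ) : Int)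
      = pvPrev board player 0 := by
    rw [PySem.List.pyRepeat_singleton]
    simp only [Int.toNat_natCast]
    rw [pvPrev]
    rw [show (List.range (board.headD []).length).map (pvPrevVal board player 0)
        = (List.range (board.headD []).length).map (fun _ => (0 : Int)) from
      List.map_congr_left (fun c _ => by simp [pvPrevVal])]
    simp [List.map_const']
  show (board.foldl (pvBStep board player k)
      (PySem.List.pyRepeat [(0 : Int)] (((board.headD []).length : ℕ) : Int), (0 : Int))).2
    = _
  rw [hinit, pv_boardfold board player k board 0 rfl 0]
  simp only [zero_add]
  rfl

theorem pv_sums_eq (board : List (List Int)) (player k : Int) (hk : 1 ≤ k) :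
    (∑ c ∈ Finset.range ((((board.headD []).length : Int)) - (k - 1)).toNat,
        ∑ r ∈ Finset.range (((board.length : Int)) - (k - 1)).toNat,
          (if (List.range k.toNat).all (fun i => pvCellN board (r + i) (c + i) == player) then (1 : Int) else 0))
    = ∑ r ∈ Finset.range board.length, ∑ c ∈ Finset.range (board.headD []).length,
        (if (pvRunN board player r c : Int) ≥ k then (1 : Int) else 0) := by
  have hkc : ((k.toNat : ℕ) : Int) = k := Int.toNat_of_nonneg (by omega)
  -- rewrite the B-side test into the window form
  have hBE : ∀ r c : ℕ,
      (if (pvRunN board player r c : Int) ≥ k then (1 : Int) else 0)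
      = (if (decide (k.toNat ≤ r + 1) && decide (k.toNat ≤ c + 1)
            && (List.range k.toNat).all (fun i => pvCellN board (r - i) (c - i) == player)) then (1 : Int) else 0) := by
    intro r c
    have h1 : ((pvRunN board player r c : Int) ≥ k) ↔ k.toNat ≤ pvRunN board player r c := by omega
    have h2 := pv_run_iff board player k.toNat r c
    by_cases h : (pvRunN board player r c : Int) ≥ k
    · obtain ⟨ha, hb, hw⟩ := h2.mp (h1.mp h)
      rw [if_pos h, if_pos]
      simp only [Bool.and_eq_true, decide_eq_true_eq, List.all_eq_true, List.mem_range, beq_iff_eq]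
      exact ⟨⟨ha, hb⟩, fun i hi => hw i hi⟩
    · rw [if_neg h, if_neg]
      intro hcond
      simp only [Bool.and_eq_true, decide_eq_true_eq, List.all_eq_true, List.mem_range, beq_iff_eq] at hcond
      exact h (h1.mpr (h2.mpr ⟨hcond.1.1, hcond.1.2, fun i hi => hcond.2 i hi⟩))
  simp only [hBE]
  rw [← Finset.sum_product', ← Finset.sum_product']
  rw [Finset.sum_boole, Finset.sum_boole]
  congr 1
  apply Finset.card_bij' (i := fun (p : ℕ × ℕ) _ => (p.2 + (k.toNat - 1), p.1 + (k.toNat - 1)))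
    (j := fun (q : ℕ × ℕ) _ => (q.2 - (k.toNat - 1), q.1 - (k.toNat - 1)))
  · -- i maps into target
    intro p hp
    simp only [Finset.mem_filter, Finset.mem_product, Finset.mem_range, List.all_eq_true,
      List.mem_range, beq_iff_eq, Bool.and_eq_true, decide_eq_true_eq] at hp ⊢
    obtain ⟨⟨hc, hr⟩, hw⟩ := hp
    have hcb : p.1 + k.toNat ≤ (board.headD []).length := by omega
    have hrb : p.2 + k.toNat ≤ board.length := by omega
    refine ⟨⟨by omega, by omega⟩, ⟨by omega, by omega⟩, ?_⟩
    intro i hi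
    have := hw (k.toNat - 1 - i) (by omega)
    rw [show p.2 + (k.toNat - 1) - i = p.2 + (k.toNat - 1 - i) from by omega,
        show p.1 + (k.toNat - 1) - i = p.1 + (k.toNat - 1 - i) from by omega]
    exact this
  · -- j maps back
    intro q hq
    simp only [Finset.mem_filter, Finset.mem_product, Finset.mem_range, List.all_eq_true,
      List.mem_range, beq_iff_eq, Bool.and_eq_true, decide_eq_true_eq] at hq ⊢
    obtain ⟨⟨hr, hc⟩, ⟨h1, h2⟩, hw⟩ := hq
    refine ⟨⟨by omega, by omega⟩, ?_⟩
    intro i hi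
    have := hw (k.toNat - 1 - i) (by omega)
    rw [show q.2 - (k.toNat - 1) + i = q.2 - (k.toNat - 1 - i) from by omega,
        show q.1 - (k.toNat - 1) + i = q.1 - (k.toNat - 1 - i) from by omega]
    exact this
  · -- left inverse
    intro p hp
    simp only [Finset.mem_filter, Finset.mem_product, Finset.mem_range] at hp
    obtain ⟨⟨hc, hr⟩, _⟩ := hp
    rw [Prod.ext_iff]
    constructor <;> simp only [] <;> omega
  · -- right inverse
    intro q hq
    simp only [Finset.mem_filter, Finset.mem_product, Finset.mem_range, Bool.and_eq_true,
      decide_eq_true_eq] at hq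
    obtain ⟨⟨hr, hc⟩, ⟨h1, h2⟩, _⟩ := hq
    rw [Prod.ext_iff]
    constructor <;> simp only [] <;> omega

theorem pv_count_eq (board : List (List Int)) (player k : Int) (hk : 1 ≤ k) :
    neg_diagonal_check_k board player k = neg_diagonal_check_k_alt board player k := by
  rw [pv_A_sum board player k hk, pv_sums_eq board player k hk, ← pv_B_sum board player k]

-- ===== VERDICT (by name: the statement is the Claim_ definition above) =====
theorem neg_diagonal_check_k_spec : Claim_equal_neg_diagonal_check_k := by
  intro board player k _hdom hpre
  unfold Spec_neg_diagonal_check_k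
  exact pv_count_eq board player k hpre.2.1
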